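-- pv_equiv track=rewrite | github.com/Davosky555/SIP_met | mwwl8422.py | pseudo_encoder
-- ===== SOURCE A (Python) =====
-- def decimal_to_binary(decimal_number):
--     """
--     This function coverts decimal to 18 bits binary number
--     :param decimal_number: Decimal number
--     :return: 18 bits binary number
--     """
--     bi_num = bin(abs(decimal_number)).replace("0b", "")
--     bi_len = len(bi_num)
--     bi_app = "0" * 18
--     bi_app = bi_app[0:18 - bi_len]
--     return bi_app + bi_num
--
-- def pseudo_encoder(int_val, byt, pos=False):
--     """
--     Pseudobinary encoder function converts binary number from -131072 to 131071
--     :param int_val: Decimal number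
--     :param byt: Number of bytes (1,2 or 3)
--     :param pos: Positive only is True
--     :return: Pseudobinary b format
--     """
--     int_val = int(str(int_val).replace(".", ""))
--     iv = 0
--     if int_val < 0 and pos:
--         return "`@@"[:byt]
--     if int_val < 0 and not pos:
--         if byt == 1 and int_val < -31:
--             return "`"
--         if byt == 2 and int_val < -2047:
--             return "`@"
--         if byt == 3 and int_val < -131071:
--             return "`@@"
--         # Call decimal_to_binary Function
--         bi_num = decimal_to_binary(int_val)
--         bi_str = ""
--         for bit in bi_num:
--             if bit == "1":
--                 bi_str += "0"
--             else:
--                 bi_str += "1"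
--         iv = int(bi_str, 2) + 1
--     if int_val >= 0:
--         if not pos:
--             if byt == 1 and int_val > 30:
--                 return "_"
--             if byt == 2 and int_val > 2046:
--                 return "_?"
--             if byt == 3 and int_val > 131070:
--                 return "_??"
--         elif pos:
--             if byt == 1 and int_val > 62:
--                 return "?"
--             if byt == 2 and int_val > 4094:
--                 return "??"
--             if byt == 3 and int_val > 262142:
--                 return "???"
--         iv = int_val
--     bi_array = [iv >> 12, (iv >> 6) & 63, iv & 63]
--     for i in range(3):
--         if bi_array[i] != int(63):
--             bi_array[i] += 64
--     if byt == 1: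
--         return chr(bi_array[2])
--     if byt == 2:
--         return chr(bi_array[1]) + chr(bi_array[2])
--     if byt == 3:
--         return chr(bi_array[0]) + chr(bi_array[1]) + chr(bi_array[2])
-- ===== SOURCE B (Python) =====
-- def pseudo_encoder(int_val, byt, pos=False):
--     """Pseudobinary encoder: table-driven range bounds and the 18-bit
--     two's-complement value 262144 + int_val replace A's per-byte guard
--     chains and bit-string flipping helper."""
--     int_val = int(str(int_val).replace(".", ""))
--     if int_val < 0 and pos:
--         return "`@@"[:byt]
--     half = {1: 32, 2: 2048, 3: 131072}[byt]
--     lo = 0 if pos else 1 - half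
--     hi = (2 * half if pos else half) - 2
--     if int_val < lo:
--         return "`@@"[:byt]
--     if int_val > hi:
--         return ("???" if pos else "_??")[:byt]
--     iv = int_val + 262144 if int_val < 0 else int_val
--     out = ""
--     for k in range(byt - 1, -1, -1):
--         c = (iv >> (6 * k)) & 63
--         out += chr(c if c == 63 else c + 64)
--     return out
-- ===== Notes on version B (the rewrite author's own statement) =====
-- stated objective: simpler
-- what changed: Replaced the decimal_to_binary helper, the 18-bit string build and bit-flip loop with the closed form iv = int_val + 262144, and the six per-byte-count literal guard branches with arithmetic bounds from a per-width half-range table; the output is assembled by one shift/mask loop over the byte count instead of a fixed 3-element array plus per-byt branches.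
-- outside the precondition, e.g. on pseudo_encoder(5, 0, False): A returns None, B raises KeyError; on pseudo_encoder(5, 4, True): A returns None, B raises KeyError
import Mathlib
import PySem

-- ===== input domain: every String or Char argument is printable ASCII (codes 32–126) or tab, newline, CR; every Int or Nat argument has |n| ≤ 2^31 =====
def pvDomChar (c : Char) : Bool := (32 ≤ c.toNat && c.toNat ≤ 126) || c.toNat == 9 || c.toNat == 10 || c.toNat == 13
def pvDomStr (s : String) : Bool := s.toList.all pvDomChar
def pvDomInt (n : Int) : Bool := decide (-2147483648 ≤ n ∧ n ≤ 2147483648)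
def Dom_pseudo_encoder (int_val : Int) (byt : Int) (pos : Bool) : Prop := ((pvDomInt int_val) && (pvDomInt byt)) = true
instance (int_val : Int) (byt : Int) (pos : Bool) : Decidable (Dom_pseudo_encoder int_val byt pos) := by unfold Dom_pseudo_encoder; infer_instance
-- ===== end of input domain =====

-- B replaces A's bit-string flipping helper and six literal guard branches by the closed
-- form iv = int_val + 262144 and arithmetic range bounds (objective: simpler).

-- ===== PORT A =====
-- bin(abs(n)).replace("0b", ""): base-2 rendering, MSB first, via Mathlib's Nat.digits; bin(0) = "0"
def pvBin (n : Nat) : List Char :=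
  if n = 0 then ['0'] else (Nat.digits 2 n).reverse.map (fun d => if d = 1 then '1' else '0')

def decimal_to_binary (decimal_number : Int) : List Char :=
  let bi_num : List Char := pvBin decimal_number.natAbs
  let bi_len : Nat := bi_num.length
  -- bi_app = ("0" * 18)[0 : 18 - bi_len]
  let bi_app : List Char := PySem.List.slice (List.replicate 18 '0') (some 0) (some (18 - (bi_len : Int)))
  bi_app ++ bi_num

-- int(s, 2): hand-ported Horner fold; exact for the nonempty all-'0'/'1' strings A feeds it
def pvIntOfBin (s : List Char) : Nat :=
  s.foldl (fun a c => 2 * a + (if c = '1' then 1 else 0)) 0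

-- chr(n); exact for 0 ≤ n < 0x110000 (here always 0 ≤ n ≤ 127)
def pvChr (n : Int) : Char := Char.ofNat n.toNat

-- a >> k for a Python int and a nonnegative shift (arithmetic shift, floors)
def pvShr (a : Int) (k : Nat) : Int := a >>> k

-- "for i in range(3): if bi_array[i] != 63: bi_array[i] += 64"
def pvAdjust (arr : List Int) : List Int :=
  (PySem.List.pyRange 0 3 1).foldl
    (fun arr i =>
      if PySem.List.pyGetD arr i 0 ≠ 63 then PySem.List.pySetD arr i (PySem.List.pyGetD arr i 0 + 64)
      else arr) arr

-- the shared fall-through tail of A: bi_array, the +64 adjustment loop, and the byt dispatch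
def pvTailA (iv : Int) (byt : Int) : String :=
  let bi_array : List Int := pvAdjust [pvShr iv 12, PySem.Int.band (pvShr iv 6) 63, PySem.Int.band iv 63]
  if byt = 1 then String.ofList [pvChr (PySem.List.pyGetD bi_array 2 0)]
  else if byt = 2 then String.ofList [pvChr (PySem.List.pyGetD bi_array 1 0), pvChr (PySem.List.pyGetD bi_array 2 0)]
  else if byt = 3 then String.ofList [pvChr (PySem.List.pyGetD bi_array 0 0), pvChr (PySem.List.pyGetD bi_array 1 0), pvChr (PySem.List.pyGetD bi_array 2 0)]
  else String.ofList []  -- Python falls off the end and returns None here; excluded by Pre_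

def pseudo_encoder (int_val : Int) (byt : Int) (pos : Bool) : String :=
  -- int(str(int_val).replace(".", "")) is the identity on an int (str of an int has no '.')
  if int_val < 0 ∧ pos = true then String.ofList (PySem.List.slice "`@@".toList none (some byt))
  else if int_val < 0 ∧ pos = false then
    if byt = 1 ∧ int_val < -31 then "`"
    else if byt = 2 ∧ int_val < -2047 then "`@"
    else if byt = 3 ∧ int_val < -131071 then "`@@"
    else
      let bi_num := decimal_to_binary int_val
      let bi_str := bi_num.foldl (fun bi_str bit => bi_str ++ [if bit = '1' then '0' else '1']) ([] : List Char)
      pvTailA ((pvIntOfBin bi_str : Int) + 1) byt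
  else  -- int_val >= 0
    if pos = false ∧ byt = 1 ∧ int_val > 30 then "_"
    else if pos = false ∧ byt = 2 ∧ int_val > 2046 then "_?"
    else if pos = false ∧ byt = 3 ∧ int_val > 131070 then "_??"
    else if pos = true ∧ byt = 1 ∧ int_val > 62 then "?"
    else if pos = true ∧ byt = 2 ∧ int_val > 4094 then "??"
    else if pos = true ∧ byt = 3 ∧ int_val > 262142 then "???"
    else pvTailA int_val byt

-- ===== PORT B =====
-- the table {1: 32, 2: 2048, 3: 131072} of half-ranges per byte count
def pvHalf : PySem.Dict Int Int := PySem.Dict.ofList [(1, 32), (2, 2048), (3, 131072)]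

def pseudo_encoder_alt (int_val : Int) (byt : Int) (pos : Bool) : String :=
  if int_val < 0 ∧ pos = true then String.ofList (PySem.List.slice "`@@".toList none (some byt))
  else
    -- {1: 32, 2: 2048, 3: 131072}[byt]; Python raises KeyError for other byt — excluded by Pre_,
    -- the 0 default is never read under Pre_
    let half : Int := PySem.Dict.getD pvHalf byt 0
    let lo : Int := if pos then 0 else 1 - half
    let hi : Int := (if pos then 2 * half else half) - 2
    if int_val < lo then String.ofList (PySem.List.slice "`@@".toList none (some byt))
    else if int_val > hi then
      String.ofList (PySem.List.slice (if pos then "???".toList else "_??".toList) none (some byt))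
    else
      let iv : Int := if int_val < 0 then int_val + 262144 else int_val
      let out : List Char := (PySem.List.pyRange (byt - 1) (-1) (-1)).foldl
        (fun out k =>
          let c : Int := PySem.Int.band (pvShr iv (6 * k).toNat) 63
          out ++ [pvChr (if c = 63 then c else c + 64)]) ([] : List Char)
      String.ofList out

-- ===== PRECONDITION & SPEC =====
-- Pre_ excludes exactly the inputs on which A falls off the dispatch at the end and returns
-- None instead of a str: byt outside {1,2,3} without the "int_val < 0 and pos" early return
-- (B's table lookup raises KeyError on those byt values).
def Pre_pseudo_encoder (int_val : Int) (byt : Int) (pos : Bool) : Prop :=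
  byt = 1 ∨ byt = 2 ∨ byt = 3 ∨ (int_val < 0 ∧ pos = true)
instance (int_val : Int) (byt : Int) (pos : Bool) : Decidable (Pre_pseudo_encoder int_val byt pos) := by
  unfold Pre_pseudo_encoder; infer_instance

def pvWitness_pseudo_encoder : Int × Int × Bool := (-5, 2, false)

def Spec_pseudo_encoder (int_val : Int) (byt : Int) (pos : Bool) (out : String) : Prop := out = pseudo_encoder_alt int_val byt pos
instance (int_val : Int) (byt : Int) (pos : Bool) (out : String) : Decidable (Spec_pseudo_encoder int_val byt pos out) := by unfold Spec_pseudo_encoder; infer_instance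

-- ===== CLAIM (what is proved, stated in full; the proofs are below) =====
def Claim_equal_pseudo_encoder : Prop := ∀ (int_val : Int) (byt : Int) (pos : Bool), Dom_pseudo_encoder int_val byt pos → Pre_pseudo_encoder int_val byt pos → Spec_pseudo_encoder int_val byt pos (pseudo_encoder int_val byt pos)

-- ===== LEMMAS AND PROOFS =====

theorem pvIntOfBin_from (s : List Char) (a : Nat) :
    s.foldl (fun a c => 2 * a + (if c = '1' then 1 else 0)) a = a * 2 ^ s.length + pvIntOfBin s := by
  induction s generalizing a with
  | nil => simp [pvIntOfBin]
  | cons c t ih =>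
      simp only [List.foldl_cons, pvIntOfBin, List.length_cons] at *
      rw [ih, ih (2 * 0 + _)]
      ring

theorem pvIntOfBin_cons (c : Char) (s : List Char) :
    pvIntOfBin (c :: s) = (if c = '1' then 1 else 0) * 2 ^ s.length + pvIntOfBin s := by
  simp only [pvIntOfBin, List.foldl_cons]
  simpa using pvIntOfBin_from s (2 * 0 + if c = '1' then 1 else 0)

theorem pvIntOfBin_lt (s : List Char) : pvIntOfBin s < 2 ^ s.length := by
  induction s with
  | nil => simp [pvIntOfBin]
  | cons c t ih =>
      rw [pvIntOfBin_cons]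
      have h : (if c = '1' then (1 : Nat) else 0) * 2 ^ t.length ≤ 2 ^ t.length := by
        split <;> omega
      simp only [List.length_cons, pow_succ]
      omega

theorem pvIntOfBin_flip (s : List Char) :
    pvIntOfBin (s.map (fun bit => if bit = '1' then '0' else '1')) = 2 ^ s.length - 1 - pvIntOfBin s := by
  induction s with
  | nil => simp [pvIntOfBin]
  | cons c t ih =>
      have ht := pvIntOfBin_lt t
      rw [List.map_cons, pvIntOfBin_cons, pvIntOfBin_cons, ih]
      have hlen : (t.map (fun bit => if bit = '1' then '0' else '1')).length = t.length := by simp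
      rw [hlen]
      have hflip : (if (if c = '1' then '0' else '1') = '1' then (1 : Nat) else 0)
          = 1 - (if c = '1' then 1 else 0) := by
        by_cases hc : c = '1' <;> simp [hc]
      rw [hflip]
      rcases (by split <;> omega :
          (if c = '1' then (1 : Nat) else 0) = 0 ∨ (if c = '1' then (1 : Nat) else 0) = 1) with h | h <;>
        rw [h] <;> simp only [List.length_cons, pow_succ] <;> omega

theorem pvIntOfBin_replicate_zero (k : Nat) (s : List Char) :
    pvIntOfBin (List.replicate k '0' ++ s) = pvIntOfBin s := by
  induction k with
  | zero => simp
  | succ n ih =>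
      rw [List.replicate_succ, List.cons_append, pvIntOfBin_cons, ih]
      simp

theorem pvIntOfBin_snoc (s : List Char) (c : Char) :
    pvIntOfBin (s ++ [c]) = 2 * pvIntOfBin s + (if c = '1' then 1 else 0) := by
  simp only [pvIntOfBin, List.foldl_append, List.foldl_cons, List.foldl_nil]

theorem pvIntOfBin_rev_digits (l : List Nat) (h : ∀ d ∈ l, d < 2) :
    pvIntOfBin (l.reverse.map (fun d => if d = 1 then '1' else '0')) = Nat.ofDigits 2 l := by
  induction l with
  | nil => simp [pvIntOfBin]
  | cons d t ih =>
      have hd : d < 2 := h d (by simp)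
      rw [List.reverse_cons, List.map_append, List.map_cons, List.map_nil, pvIntOfBin_snoc,
        ih (fun x hx => h x (by simp [hx])), Nat.ofDigits_cons]
      by_cases h1 : d = 1 <;> simp [h1] <;> omega

theorem pvIntOfBin_pvBin (n : Nat) : pvIntOfBin (pvBin n) = n := by
  unfold pvBin
  split
  · simp [pvIntOfBin, *]
  · rw [pvIntOfBin_rev_digits _ (fun d hd => Nat.digits_lt_base (by norm_num) hd),
      Nat.ofDigits_digits]

theorem length_pvBin_le (n : Nat) (h : n < 2 ^ 18) : (pvBin n).length ≤ 18 := by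
  unfold pvBin
  split
  · simp
  · simpa using (Nat.digits_length_le_iff (b := 2) (k := 18) (by norm_num) n).mpr h

-- the flipped 18-bit string of a negative int_val evaluates to the two's complement value
theorem pv_neg_iv (int_val : Int) (h1 : int_val < 0) (h2 : -262144 < int_val) :
    ((pvIntOfBin ((decimal_to_binary int_val).foldl
        (fun bi_str bit => bi_str ++ [if bit = '1' then '0' else '1']) ([] : List Char)) : Int) + 1)
      = int_val + 262144 := by
  have hm1 : 1 ≤ int_val.natAbs := by omega
  have hm2 : int_val.natAbs < 2 ^ 18 := by omega
  have hlen := length_pvBin_le int_val.natAbs hm2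
  have hdtb : decimal_to_binary int_val
      = List.replicate (18 - (pvBin int_val.natAbs).length) '0' ++ pvBin int_val.natAbs := by
    simp only [decimal_to_binary]
    congr 1
    rw [PySem.List.slice_zero_start,
      PySem.List.slice_to (xs := List.replicate 18 '0')
        (b := 18 - ((pvBin int_val.natAbs).length : Int)) (by omega)]
    have : ((18 : Int) - ((pvBin int_val.natAbs).length : Int)).toNat
        = 18 - (pvBin int_val.natAbs).length := by omega
    rw [this, List.take_replicate]
    congr 1
    omega
  rw [PySem.List.foldl_append_singleton_eq_map, List.nil_append, hdtb, pvIntOfBin_flip,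
    pvIntOfBin_replicate_zero, pvIntOfBin_pvBin]
  have hlen18 : (List.replicate (18 - (pvBin int_val.natAbs).length) '0'
      ++ pvBin int_val.natAbs).length = 18 := by
    simp only [List.length_append, List.length_replicate]
    omega
  rw [hlen18]
  norm_num
  omega

-- index/update of a 3-element list at the literal indices the adjustment loop uses
theorem pvG0 (a b c d : Int) : PySem.List.pyGetD [a, b, c] 0 d = a := by
  simp [PySem.List.pyGetD, PySem.List.pyGet?, PySem.List.pyIdx?]
theorem pvG1 (a b c d : Int) : PySem.List.pyGetD [a, b, c] 1 d = b := by
  simp [PySem.List.pyGetD, PySem.List.pyGet?, PySem.List.pyIdx?]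
theorem pvG2 (a b c d : Int) : PySem.List.pyGetD [a, b, c] 2 d = c := by
  simp [PySem.List.pyGetD, PySem.List.pyGet?, PySem.List.pyIdx?]
theorem pvS0 (a b c v : Int) : PySem.List.pySetD [a, b, c] 0 v = [v, b, c] := by
  simp [PySem.List.pySetD, PySem.List.pySet?, PySem.List.pyIdx?]
theorem pvS1 (a b c v : Int) : PySem.List.pySetD [a, b, c] 1 v = [a, v, c] := by
  simp [PySem.List.pySetD, PySem.List.pySet?, PySem.List.pyIdx?]
theorem pvS2 (a b c v : Int) : PySem.List.pySetD [a, b, c] 2 v = [a, b, v] := by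
  simp [PySem.List.pySetD, PySem.List.pySet?, PySem.List.pyIdx?]

-- the adjustment loop over bi_array, computed entrywise
theorem pvAdjust3 (x y z : Int) :
    pvAdjust [x, y, z]
    = [if x ≠ 63 then x + 64 else x, if y ≠ 63 then y + 64 else y, if z ≠ 63 then z + 64 else z] := by
  unfold pvAdjust
  rw [show PySem.List.pyRange 0 3 1 = [0, 1, 2] from by decide]
  simp only [List.foldl_cons, List.foldl_nil]
  by_cases hx : x = 63 <;> by_cases hy : y = 63 <;> by_cases hz : z = 63 <;>
    simp [hx, hy, hz, pvG1, pvG2, pvS0, pvS1, pvS2]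

theorem pvHalf1 : PySem.Dict.getD pvHalf 1 0 = 32 := by decide
theorem pvHalf2 : PySem.Dict.getD pvHalf 2 0 = 2048 := by decide
theorem pvHalf3 : PySem.Dict.getD pvHalf 3 0 = 131072 := by decide

-- the two output-assembly tails agree for 0 ≤ iv < 2^18 and byt ∈ {1, 2, 3}
theorem pv_tail_eq (iv : Int) (byt : Int) (h0 : 0 ≤ iv) (h1 : iv < 262144)
    (hb : byt = 1 ∨ byt = 2 ∨ byt = 3) :
    pvTailA iv byt = String.ofList ((PySem.List.pyRange (byt - 1) (-1) (-1)).foldl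
      (fun out k =>
        let c : Int := PySem.Int.band (pvShr iv (6 * k).toNat) 63
        out ++ [pvChr (if c = 63 then c else c + 64)]) ([] : List Char)) := by
  obtain ⟨n, rfl⟩ : ∃ n : Nat, iv = (n : Int) := ⟨iv.toNat, by omega⟩
  have hn : n < 262144 := by exact_mod_cast h1
  have hshift : ∀ k : Nat, ((n : Int) >>> k) = ((n >>> k : Nat) : Int) := fun k => by
    simp [Int.natCast_shiftRight]
  have hdiv : ∀ k : Nat, n >>> k = n / 2 ^ k := fun k => Nat.shiftRight_eq_div_pow n k
  have hband : ∀ m : Nat, PySem.Int.band (m : Int) 63 = ((m % 64 : Nat) : Int) := fun m => by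
    have := PySem.Int.band_natCast m 63
    rw [show ((63 : Nat) : Int) = (63 : Int) by norm_num] at this
    rw [this]
    congr 1
    simpa using Nat.and_two_pow_sub_one_eq_mod m 6
  have hsh : ∀ k : Nat, pvShr (n : Int) k = ((n / 2 ^ k : Nat) : Int) := fun k => by
    rw [pvShr, hshift, hdiv]
  have ha : n / 4096 < 64 := by omega
  have e1 : pvShr (n : Int) 12 = ((n / 4096 : Nat) : Int) := by
    rw [hsh]; norm_num
  have e2 : PySem.Int.band (pvShr (n : Int) 6) 63 = ((n / 64 % 64 : Nat) : Int) := by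
    rw [hsh, hband]; norm_num
  have e3 : PySem.Int.band ((n : Int)) 63 = ((n % 64 : Nat) : Int) := hband n
  have r0 : PySem.Int.band (pvShr (n : Int) (6 * (0 : Int)).toNat) 63 = ((n % 64 : Nat) : Int) := by
    rw [show ((6 * (0 : Int)).toNat) = 0 from rfl, hsh, hband]; norm_num
  have r1 : PySem.Int.band (pvShr (n : Int) (6 * (1 : Int)).toNat) 63 = ((n / 64 % 64 : Nat) : Int) := by
    rw [show ((6 * (1 : Int)).toNat) = 6 from rfl, hsh, hband]; norm_num
  have r2 : PySem.Int.band (pvShr (n : Int) (6 * (2 : Int)).toNat) 63 = ((n / 4096 : Nat) : Int) := by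
    rw [show ((6 * (2 : Int)).toNat) = 12 from rfl, hsh, hband]; omega
  rcases hb with rfl | rfl | rfl
  · rw [show PySem.List.pyRange (1 - 1) (-1) (-1) = [0] from by decide]
    simp only [List.foldl_cons, List.foldl_nil, List.nil_append, r0]
    unfold pvTailA
    simp only [pvAdjust3, e1, e2, e3]
    norm_num [pvG0, pvG1, pvG2]
  · rw [show PySem.List.pyRange (2 - 1) (-1) (-1) = [1, 0] from by decide]
    simp only [List.foldl_cons, List.foldl_nil, List.nil_append, r0, r1]
    unfold pvTailA
    simp only [pvAdjust3, e1, e2, e3]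
    norm_num [pvG0, pvG1, pvG2]
  · rw [show PySem.List.pyRange (3 - 1) (-1) (-1) = [2, 1, 0] from by decide]
    simp only [List.foldl_cons, List.foldl_nil, List.nil_append, r0, r1, r2]
    unfold pvTailA
    simp only [pvAdjust3, e1, e2, e3]
    norm_num [pvG0, pvG1, pvG2]

-- ===== VERDICT (by name: the statement is the Claim_ definition above) =====
theorem pseudo_encoder_spec : Claim_equal_pseudo_encoder := by
  intro int_val byt pos hdom hpre
  unfold Spec_pseudo_encoder pseudo_encoder pseudo_encoder_alt
  by_cases hnp : int_val < 0 ∧ pos = true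
  · rw [if_pos hnp, if_pos hnp]
  · rw [if_neg hnp, if_neg hnp]
    have hb : byt = 1 ∨ byt = 2 ∨ byt = 3 := by
      rcases hpre with h | h | h | h
      · exact Or.inl h
      · exact Or.inr (Or.inl h)
      · exact Or.inr (Or.inr h)
      · exact absurd h hnp
    simp only []
    by_cases hneg : int_val < 0
    · have hposf : pos = false := by
        cases pos
        · rfl
        · exact absurd ⟨hneg, rfl⟩ hnp
      subst hposf
      rw [if_pos ⟨hneg, rfl⟩]
      rcases hb with rfl | rfl | rfl
      · by_cases hlt : int_val < -31
        · rw [if_pos ⟨rfl, hlt⟩, if_pos (by simp [pvHalf1]; omega)]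
          decide
        · rw [if_neg (by tauto), if_neg (by norm_num), if_neg (by norm_num),
            pv_neg_iv int_val hneg (by omega),
            pv_tail_eq (int_val + 262144) 1 (by omega) (by omega) (Or.inl rfl),
            if_neg (by simp [pvHalf1]; omega), if_neg (by simp [pvHalf1]; omega), if_pos hneg]
      · rw [if_neg (by norm_num)]
        by_cases hlt : int_val < -2047
        · rw [if_pos ⟨rfl, hlt⟩, if_pos (by simp [pvHalf2]; omega)]
          decide
        · rw [if_neg (by tauto), if_neg (by norm_num),
            pv_neg_iv int_val hneg (by omega),
            pv_tail_eq (int_val + 262144) 2 (by omega) (by omega) (Or.inr (Or.inl rfl)),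
            if_neg (by simp [pvHalf2]; omega), if_neg (by simp [pvHalf2]; omega), if_pos hneg]
      · rw [if_neg (by norm_num), if_neg (by norm_num)]
        by_cases hlt : int_val < -131071
        · rw [if_pos ⟨rfl, hlt⟩, if_pos (by simp [pvHalf3]; omega)]
          decide
        · rw [if_neg (by tauto),
            pv_neg_iv int_val hneg (by omega),
            pv_tail_eq (int_val + 262144) 3 (by omega) (by omega) (Or.inr (Or.inr rfl)),
            if_neg (by simp [pvHalf3]; omega), if_neg (by simp [pvHalf3]; omega), if_pos hneg]
    · -- int_val >= 0
      rw [if_neg (by tauto)]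
      cases pos with
      | false =>
          rcases hb with rfl | rfl | rfl
          · by_cases hgt : int_val > 30
            · rw [if_pos ⟨rfl, rfl, hgt⟩, if_neg (by simp [pvHalf1]; omega), if_pos (by simp [pvHalf1]; omega)]
              decide
            · rw [if_neg (by tauto), if_neg (by norm_num), if_neg (by norm_num),
                if_neg (by norm_num), if_neg (by norm_num), if_neg (by norm_num),
                pv_tail_eq int_val 1 (by omega) (by omega) (Or.inl rfl)]
              norm_num [pvHalf1]
              split_ifs <;> first | rfl | (exfalso; omega)
          · by_cases hgt : int_val > 2046
            · rw [if_neg (by norm_num), if_pos ⟨rfl, rfl, hgt⟩, if_neg (by simp [pvHalf2]; omega),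
                if_pos (by simp [pvHalf2]; omega)]
              decide
            · rw [if_neg (by norm_num), if_neg (by tauto), if_neg (by norm_num),
                if_neg (by norm_num), if_neg (by norm_num), if_neg (by norm_num),
                pv_tail_eq int_val 2 (by omega) (by omega) (Or.inr (Or.inl rfl))]
              norm_num [pvHalf2]
              split_ifs <;> first | rfl | (exfalso; omega)
          · by_cases hgt : int_val > 131070
            · rw [if_neg (by norm_num), if_neg (by norm_num), if_pos ⟨rfl, rfl, hgt⟩,
                if_neg (by simp [pvHalf3]; omega), if_pos (by simp [pvHalf3]; omega)]
              decide
            · rw [if_neg (by norm_num), if_neg (by norm_num), if_neg (by tauto),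
                if_neg (by norm_num), if_neg (by norm_num), if_neg (by norm_num),
                pv_tail_eq int_val 3 (by omega) (by omega) (Or.inr (Or.inr rfl))]
              norm_num [pvHalf3]
              split_ifs <;> first | rfl | (exfalso; omega)
      | true =>
          rcases hb with rfl | rfl | rfl
          · by_cases hgt : int_val > 62
            · rw [if_neg (by norm_num), if_neg (by norm_num), if_neg (by norm_num),
                if_pos ⟨rfl, rfl, hgt⟩, if_neg (by simp [pvHalf1]; omega), if_pos (by simp [pvHalf1]; omega)]
              decide
            · rw [if_neg (by norm_num), if_neg (by norm_num), if_neg (by norm_num),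
                if_neg (by tauto), if_neg (by norm_num), if_neg (by norm_num),
                pv_tail_eq int_val 1 (by omega) (by omega) (Or.inl rfl)]
              norm_num [pvHalf1]
              split_ifs <;> first | rfl | (exfalso; omega)
          · by_cases hgt : int_val > 4094
            · rw [if_neg (by norm_num), if_neg (by norm_num), if_neg (by norm_num),
                if_neg (by norm_num), if_pos ⟨rfl, rfl, hgt⟩, if_neg (by simp [pvHalf2]; omega),
                if_pos (by simp [pvHalf2]; omega)]
              decide
            · rw [if_neg (by norm_num), if_neg (by norm_num), if_neg (by norm_num),
                if_neg (by norm_num), if_neg (by tauto), if_neg (by norm_num),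
                pv_tail_eq int_val 2 (by omega) (by omega) (Or.inr (Or.inl rfl))]
              norm_num [pvHalf2]
              split_ifs <;> first | rfl | (exfalso; omega)
          · by_cases hgt : int_val > 262142
            · rw [if_neg (by norm_num), if_neg (by norm_num), if_neg (by norm_num),
                if_neg (by norm_num), if_neg (by norm_num), if_pos ⟨rfl, rfl, hgt⟩,
                if_neg (by simp [pvHalf3]; omega), if_pos (by simp [pvHalf3]; omega)]
              decide
            · rw [if_neg (by norm_num), if_neg (by norm_num), if_neg (by norm_num),
                if_neg (by norm_num), if_neg (by norm_num), if_neg (by tauto),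
                pv_tail_eq int_val 3 (by omega) (by omega) (Or.inr (Or.inr rfl))]
              norm_num [pvHalf3]
              split_ifs <;> first | rfl | (exfalso; omega)
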